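-- pv_equiv track=rewrite | github.com/MattYoon/Algorithm-Practice | 2-prefix_sum/c1285B.py | solve
-- ===== SOURCE A (Python) =====
-- def solve(a):
--     sum1, sum2 = 0, 0
--     for i in range(len(a)):
--         sum1 += a[i]
--         sum2 += a[len(a) - i - 1]
--         if sum1 <= 0:
--             return False
--         if sum2 <= 0:
--             return False
--     return True
-- ===== SOURCE B (Python) =====
-- def solve(a):
--     # Build the prefix-sum array once; every suffix sum equals the total minus a
--     # proper prefix sum, so the answer reduces to two extremum comparisons:
--     # the minimum prefix sum must be positive (forward direction) and the
--     # maximum of zero and the proper prefix sums must be below the total (backward).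
--     p, s = [], 0
--     for x in a:
--         s += x
--         p.append(s)
--     if not p:
--         return True
--     return min(p) > 0 and max([0] + p[:-1]) < p[-1]
-- ===== Notes on version B (the rewrite author's own statement) =====
-- stated objective: alternative
-- what changed: Instead of A's interleaved dual-direction running-sum loop with early returns, B materialises the prefix-sum array once and reduces both directions to two extremum comparisons (minimum of the prefix sums positive; maximum of zero and the proper prefix sums below the total), using the identity that every suffix sum equals the total minus a proper prefix sum.
import Mathlib
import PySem

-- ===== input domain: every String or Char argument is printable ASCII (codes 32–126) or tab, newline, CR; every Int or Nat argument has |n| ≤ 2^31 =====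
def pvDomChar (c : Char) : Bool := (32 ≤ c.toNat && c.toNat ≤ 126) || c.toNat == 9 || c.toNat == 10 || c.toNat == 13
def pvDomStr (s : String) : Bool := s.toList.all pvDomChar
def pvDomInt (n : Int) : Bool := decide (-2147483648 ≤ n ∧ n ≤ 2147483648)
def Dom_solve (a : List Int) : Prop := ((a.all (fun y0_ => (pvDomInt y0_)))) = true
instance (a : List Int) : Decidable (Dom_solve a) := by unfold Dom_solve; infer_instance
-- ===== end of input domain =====

-- B replaces A's interleaved dual-direction running-sum loop by one prefix-sum array and two
-- extremum comparisons (min(p) > 0, max([0]+p[:-1]) < p[-1]), via suffix sum = total - prefix sum.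

-- ===== PORT A =====
-- A's for-loop over range(len(a)) with early returns, as index recursion over i.
def solveLoop (a : List Int) (n : Nat) (i : Nat) (s1 s2 : Int) : Bool :=
  if h : i < n then
    let s1' := s1 + (PySem.List.pyGet? a (i : Int)).getD 0
    let s2' := s2 + (PySem.List.pyGet? a ((n : Int) - (i : Int) - 1)).getD 0
    if s1' ≤ 0 then false
    else if s2' ≤ 0 then false
    else solveLoop a n (i + 1) s1' s2'
  else true
termination_by n - i

def solve (a : List Int) : Bool := solveLoop a a.length 0 0 0

-- ===== PORT B =====
-- Source B: build the prefix-sum list p, then 'not p' guard and the two extremum comparisons.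
def solve_alt (a : List Int) : Bool :=
  let st := a.foldl (fun (st : List Int × Int) x => (st.1 ++ [st.2 + x], st.2 + x)) ([], 0)
  let p := st.1
  if p = [] then true
  else decide (0 < (PySem.List.min? p (fun y => y)).getD 0) &&
       decide ((PySem.List.max? (0 :: PySem.List.slice p none (some (-1))) (fun y => y)).getD 0
                 < (PySem.List.pyGet? p (-1)).getD 0)

-- ===== PRECONDITION & SPEC =====
def Spec_solve (a : List Int) (out : Bool) : Prop := out = solve_alt a
instance (a : List Int) (out : Bool) : Decidable (Spec_solve a out) := by unfold Spec_solve; infer_instance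

-- ===== CLAIM (what is proved, stated in full; the proofs are below) =====
def Claim_equal_solve : Prop := ∀ (a : List Int), Dom_solve a → Spec_solve a (solve a)

-- ===== LEMMAS AND PROOFS =====

-- proof-side helper: the list of running prefix sums starting from s
def prefixList (s : Int) : List Int → List Int
  | [] => []
  | x :: xs => (s + x) :: prefixList (s + x) xs

-- proof-side helper: "all prefix sums from s stay positive" as an early-exit loop (A's shape)
def okP (s : Int) : List Int → Bool
  | [] => true
  | x :: xs => if s + x ≤ 0 then false else okP (s + x) xs

theorem solveLoop_eq (a : List Int) (i : Nat) (s1 s2 : Int) (hi : i ≤ a.length) :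
    solveLoop a a.length i s1 s2 =
      (okP s1 (a.drop i) && okP s2 (a.reverse.drop i)) := by
  induction hn : a.length - i generalizing i s1 s2 with
  | zero =>
    have : i = a.length := by omega
    subst this
    rw [solveLoop]
    simp [okP, List.drop_eq_nil_of_le]
  | succ k ih =>
    have h : i < a.length := by omega
    have h' : i < a.reverse.length := by simpa using h
    rw [solveLoop]
    rw [dif_pos h]
    have e1 : (PySem.List.pyGet? a (i : Int)).getD 0 = a[i] := by
      rw [PySem.List.pyGet?_natCast]
      simp [List.getElem?_eq_getElem h]
    have e2 : (PySem.List.pyGet? a ((a.length : Int) - (i : Int) - 1)).getD 0 = a.reverse[i] := by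
      have hcast : ((a.length : Int) - (i : Int) - 1) = ((a.length - i - 1 : Nat) : Int) := by
        omega
      rw [hcast, PySem.List.pyGet?_natCast]
      have hlt : a.length - i - 1 < a.length := by omega
      rw [List.getElem?_eq_getElem hlt]
      simp [List.getElem_reverse]
      congr 1
      omega
    have d1 : a.drop i = a[i] :: a.drop (i + 1) := List.drop_eq_getElem_cons h
    have d2 : a.reverse.drop i = a.reverse[i] :: a.reverse.drop (i + 1) :=
      List.drop_eq_getElem_cons h'
    rw [d1, d2]
    simp only [okP]
    rw [e1, e2, ih (i + 1) (s1 + a[i]) (s2 + a.reverse[i]) (by omega) (by omega)]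
    split_ifs with c1 c2 <;> simp [*]

theorem foldl_build (xs : List Int) (acc : List Int) (s : Int) :
    xs.foldl (fun (st : List Int × Int) x => (st.1 ++ [st.2 + x], st.2 + x)) (acc, s) =
      (acc ++ prefixList s xs, s + xs.sum) := by
  induction xs generalizing acc s with
  | nil => simp [prefixList]
  | cons x xs ih => simp [prefixList, ih, List.append_assoc]; ring

theorem prefixList_eq_map (xs : List Int) (s : Int) :
    prefixList s xs = (List.range xs.length).map (fun i => s + (xs.take (i + 1)).sum) := by
  induction xs generalizing s with
  | nil => simp [prefixList]
  | cons x xs ih =>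
    simp only [prefixList, List.length_cons, List.range_succ_eq_map, List.map_cons, List.map_map]
    refine List.cons_eq_cons.mpr ⟨by simp, ?_⟩
    rw [ih (s + x)]
    apply List.map_congr_left
    intro i _
    simp [Function.comp, List.take_succ_cons, add_assoc]

theorem okP_iff (xs : List Int) (s : Int) :
    okP s xs = true ↔ ∀ y ∈ prefixList s xs, 0 < y := by
  induction xs generalizing s with
  | nil => simp [okP, prefixList]
  | cons x xs ih =>
    simp only [okP, prefixList, List.mem_cons]
    split_ifs with h
    · constructor
      · intro hc; exact absurd hc (by simp)
      · intro hall; exfalso; have := hall (s + x) (Or.inl rfl); omega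
    · rw [ih (s + x)]
      constructor
      · rintro hall y (rfl | hy)
        · omega
        · exact hall y hy
      · intro hall y hy; exact hall y (Or.inr hy)

theorem take_reverse_sum (xs : List Int) (k : Nat) (_hk : k ≤ xs.length) :
    (xs.reverse.take k).sum = xs.sum - (xs.take (xs.length - k)).sum := by
  have h1 : xs.reverse.take k = (xs.drop (xs.length - k)).reverse := by
    rw [List.take_reverse]
  rw [h1, List.sum_reverse]
  have := List.sum_take_add_sum_drop xs (xs.length - k)
  omega

-- both directions reduced to: every proper prefix sum is strictly below the total
theorem rev_side_iff (a : List Int) :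
    (∀ y ∈ prefixList 0 a.reverse, 0 < y) ↔
      ∀ j, j < a.length → (a.take j).sum < a.sum := by
  rw [prefixList_eq_map]
  simp only [List.mem_map, List.mem_range, List.length_reverse]
  constructor
  · intro hall j hj
    have := hall (0 + (a.reverse.take (a.length - j - 1 + 1)).sum)
      ⟨a.length - j - 1, by omega, rfl⟩
    rw [take_reverse_sum a _ (by omega)] at this
    have hj' : a.length - (a.length - j - 1 + 1) = j := by omega
    rw [hj'] at this
    omega
  · rintro hall y ⟨i, hi, rfl⟩
    rw [take_reverse_sum a _ (by omega)]
    have := hall (a.length - (i + 1)) (by omega)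
    omega

theorem q_side_iff (a : List Int) (h : a ≠ []) :
    (∀ z ∈ 0 :: (prefixList 0 a).dropLast, z < a.sum) ↔
      ∀ j, j < a.length → (a.take j).sum < a.sum := by
  have hd : (prefixList 0 a).dropLast =
      (List.range (a.length - 1)).map (fun i => 0 + (a.take (i + 1)).sum) := by
    rw [prefixList_eq_map, List.dropLast_eq_take]
    rw [List.length_map, List.length_range, ← List.map_take, List.take_range]
    congr 2
    omega
  rw [hd]
  simp only [List.mem_cons, List.mem_map, List.mem_range]
  have hn : 0 < a.length := List.length_pos_of_ne_nil h
  constructor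
  · intro hall j hj
    rcases Nat.eq_zero_or_pos j with rfl | hj0
    · have := hall 0 (Or.inl rfl); simpa using this
    · have := hall (0 + (a.take j).sum) (Or.inr ⟨j - 1, by omega, by rw [show j - 1 + 1 = j by omega]⟩)
      omega
  · rintro hall z (rfl | ⟨i, hi, rfl⟩)
    · have := hall 0 hn; simpa using this
    · have := hall (i + 1) (by omega); omega

theorem prefixList_length (xs : List Int) (s : Int) :
    (prefixList s xs).length = xs.length := by
  rw [prefixList_eq_map]; simp

theorem prefixList_getLast? (a : List Int) (h : a ≠ []) :
    (prefixList 0 a).getLast? = some a.sum := by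
  rw [prefixList_eq_map]
  have hn : 0 < a.length := List.length_pos_of_ne_nil h
  rw [List.getLast?_eq_getElem?]
  simp only [List.length_map, List.length_range]
  rw [List.getElem?_map]
  rw [List.getElem?_range (by omega)]
  simp [List.take_of_length_le (by omega : a.length ≤ a.length - 1 + 1)]

-- ===== VERDICT (by name: the statement is the Claim_ definition above) =====
theorem solve_spec : Claim_equal_solve := by
  intro a _
  unfold Spec_solve solve solve_alt
  rw [solveLoop_eq a 0 0 0 (by omega)]
  simp only [List.drop_zero, foldl_build, List.nil_append]
  rcases eq_or_ne a [] with rfl | h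
  · simp [prefixList, okP]
  · have hp : prefixList 0 a ≠ [] := by
      intro hc
      have := prefixList_length a 0
      rw [hc] at this
      exact h (List.eq_nil_of_length_eq_zero this.symm)
    rw [if_neg hp]
    -- min side
    obtain ⟨m, hm⟩ : ∃ m, PySem.List.min? (prefixList 0 a) (fun y => y) = some m := by
      rcases he : PySem.List.min? (prefixList 0 a) (fun y => y) with _ | m
      · rw [PySem.List.min?_eq_none_iff] at he; exact absurd he hp
      · exact ⟨m, rfl⟩
    have hmmem := PySem.List.min?_mem hm
    have hmmin := PySem.List.min?_isMin hm
    -- max side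
    rw [PySem.List.slice_to_neg_one]
    obtain ⟨M, hM⟩ : ∃ M, PySem.List.max? (0 :: (prefixList 0 a).dropLast) (fun y => y) = some M := by
      rcases he : PySem.List.max? (0 :: (prefixList 0 a).dropLast) (fun y => y) with _ | M
      · rw [PySem.List.max?_eq_none_iff] at he; simp at he
      · exact ⟨M, rfl⟩
    have hMmem := PySem.List.max?_mem hM
    have hMmax := PySem.List.max?_isMax hM
    rw [PySem.List.pyGet?_neg_one, prefixList_getLast? a h, hm, hM]
    simp only [Option.getD_some]
    have hfwd : okP 0 a = decide (0 < m) := by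
      rw [Bool.eq_iff_iff, okP_iff, decide_eq_true_iff]
      constructor
      · intro hall; exact hall m hmmem
      · intro h0 y hy; exact lt_of_lt_of_le h0 (hmmin y hy)
    have hrev : okP 0 a.reverse = decide (M < a.sum) := by
      rw [Bool.eq_iff_iff, okP_iff, decide_eq_true_iff]
      rw [rev_side_iff, ← q_side_iff a h]
      constructor
      · intro hall; exact hall M hMmem
      · intro h0 z hz; exact lt_of_le_of_lt (hMmax z hz) h0
    rw [hfwd, hrev]
    rfl
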